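-- pv_equiv track=rewrite | github.com/MajedSaade/PythonKatasFursa | katas/requirements_coverage.py | select_minimal_test_cases
-- ===== SOURCE A (Python) =====
-- from typing import List
--
-- def select_minimal_test_cases(test_cases: List[List[int]]) -> List[int]:
--     """
--     In software testing, it's often required to select a minimal set of test cases that cover all the requirements.
--     You are given a set of test cases and their associated covered requirements.
--     Your task is to select the minimal subset of test cases such that all requirements are covered.
--
--     For example, you have the following test cases and requirements they cover:
--
--     test_cases = [
--         [1, 2, 3],   # Test case 0 covers requirements 1, 2, 3
--         [1, 4],      # Test case 1 covers requirements 1, 4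
--         [2, 3, 4],   # Test case 2 covers requirements 2, 3, 4
--         [1, 5],      # Test case 3 covers requirements 1, 5
--         [3, 5]       # Test case 4 covers requirements 3, 5
--     ]
--
--     Args:
--         test_cases: a list of test cases, where each test case is a list of requirements it covers.
--                     Assume each requirement is covered by at least one test case.
--
--     Returns:
--         A list of indices of the minimal subset of test cases that covers all requirements
--     """
--     all_requirements = set()
--     for test_case in test_cases:
--         all_requirements.update(test_case)
--
--     selected_indices = []
--     covered_requirements = set()
--
--     while covered_requirements != all_requirements:
--         best_index = -1
--         best_coverage = 0
--
--         for i, test_case in enumerate(test_cases):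
--             if i in selected_indices:
--                 continue
--
--             new_coverage = len(set(test_case) - covered_requirements)
--
--             if new_coverage > best_coverage:
--                 best_coverage = new_coverage
--                 best_index = i
--
--         if best_index != -1:
--             selected_indices.append(best_index)
--             covered_requirements.update(test_cases[best_index])
--
--     return selected_indices
-- ===== SOURCE B (Python) =====
-- def select_minimal_test_cases(test_cases):
--     # Alternative greedy: instead of a covered-set and membership skips, keep for each
--     # test case the residual list of its distinct not-yet-covered requirements, pick the
--     # case with the longest residual (first on ties), and filter the chosen residual out.
--     rem = []
--     for tc in test_cases:
--         d = []
--         for r in tc: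
--             if r not in d:
--                 d.append(r)
--         rem.append(d)
--     selected = []
--     while any(rem):
--         best = max(range(len(rem)), key=lambda i: len(rem[i]))
--         selected.append(best)
--         newly = set(rem[best])
--         rem = [[r for r in lst if r not in newly] for lst in rem]
--     return selected
-- ===== Notes on version B (the rewrite author's own statement) =====
-- stated objective: alternative
-- what changed: Replaces the covered-set greedy (per round: rescan every test case, re-deduplicate it and compute a set difference against the covered set, skipping already-selected indices) by residual structures: each case keeps the list of its distinct not-yet-covered requirements, the round picks the longest residual via max(range, key) and filters the chosen residual out of all lists, so selected cases vanish naturally instead of being skipped.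
import Mathlib
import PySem

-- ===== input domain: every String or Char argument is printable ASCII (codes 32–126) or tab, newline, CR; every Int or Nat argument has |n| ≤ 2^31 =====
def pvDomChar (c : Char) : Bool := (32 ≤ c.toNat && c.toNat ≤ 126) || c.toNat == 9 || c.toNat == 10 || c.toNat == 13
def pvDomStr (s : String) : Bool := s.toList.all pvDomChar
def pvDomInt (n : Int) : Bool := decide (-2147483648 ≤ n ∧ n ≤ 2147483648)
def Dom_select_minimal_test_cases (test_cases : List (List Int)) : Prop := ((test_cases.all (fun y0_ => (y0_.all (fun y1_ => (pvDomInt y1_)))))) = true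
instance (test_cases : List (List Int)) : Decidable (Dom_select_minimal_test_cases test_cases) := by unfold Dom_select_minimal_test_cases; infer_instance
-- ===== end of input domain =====

-- B replaces A's covered-set greedy (rescanning all cases and re-computing set differences,
-- skipping already-selected indices) by residual requirement lists that are filtered in place;
-- objective: alternative algorithmic structure, same exact output.

-- ===== PORT A =====
-- body of A's inner 'for i, test_case in enumerate(test_cases)' scan
def pvStepA (selected : List Int) (covered : PySem.Set Int) (b : Int × Int) (p : Int × List Int) : Int × Int :=
  if p.1 ∈ selected then b            -- if i in selected_indices: continue
  else
    let g : Int := ((PySem.Set.diff (PySem.Set.ofList p.2) covered).length : Int)  -- len(set(test_case) - covered_requirements)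
    if g > b.2 then (p.1, g) else b

def pvBestA (test_cases : List (List Int)) (selected : List Int) (covered : PySem.Set Int) : Int × Int :=
  (PySem.List.enumerate test_cases).foldl (pvStepA selected covered) (-1, 0)

-- the 'while covered_requirements != all_requirements' loop; fuel is only a structural
-- guard (the Python loop runs at most test_cases.length times, see the proofs below)
def pvLoopA (test_cases : List (List Int)) (allReq : PySem.Set Int) :
    Nat → List Int → PySem.Set Int → List Int
  | 0, selected, _ => selected
  | fuel+1, selected, covered =>
    if PySem.Set.equal covered allReq then selected
    else
      let b := pvBestA test_cases selected covered
      if b.1 ≠ -1 then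
        -- test_cases[best_index]: best_index stems from enumerate, so it is in range
        pvLoopA test_cases allReq fuel (selected ++ [b.1])
          (PySem.Set.update covered (PySem.List.pyGetD test_cases b.1 []))
      else selected  -- only reachable together with covered == all (loop exit); Python never appends here

def select_minimal_test_cases (test_cases : List (List Int)) : List Int :=
  let allReq : PySem.Set Int :=
    test_cases.foldl (fun acc tc => PySem.Set.update acc tc) PySem.Set.empty
  pvLoopA test_cases allReq (test_cases.length + 1) [] PySem.Set.empty

-- ===== PORT B =====
-- d = []; for r in tc: if r not in d: d.append(r)
def pvDedupB (tc : List Int) : List Int :=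
  tc.foldl (fun d r => if r ∈ d then d else d ++ [r]) []

-- the 'while any(rem)' loop; fuel is only a structural guard (each round empties rem[best])
def pvLoopB : Nat → List (List Int) → List Int → List Int
  | 0, _, acc => acc
  | fuel+1, rem, acc =>
    if rem.any (fun l => !l.isEmpty) then
      -- max(range(len(rem)), key=lambda i: len(rem[i])): nonempty range since rem has a nonempty member
      let best : Int :=
        (PySem.List.max? (PySem.List.pyRange 0 rem.length 1)
          (fun i => (PySem.List.pyGetD rem i []).length)).getD 0
      let newly : PySem.Set Int := PySem.Set.ofList (PySem.List.pyGetD rem best [])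
      pvLoopB fuel (rem.map (fun l => l.filter (fun r => !(PySem.Set.contains newly r))))
        (acc ++ [best])
    else acc

def select_minimal_test_cases_alt (test_cases : List (List Int)) : List Int :=
  pvLoopB (test_cases.length + 1)
    (test_cases.foldl (fun rem tc => rem ++ [pvDedupB tc]) []) []

-- ===== PRECONDITION & SPEC =====
def Spec_select_minimal_test_cases (test_cases : List (List Int)) (out : List Int) : Prop := out = select_minimal_test_cases_alt test_cases
instance (test_cases : List (List Int)) (out : List Int) : Decidable (Spec_select_minimal_test_cases test_cases out) := by unfold Spec_select_minimal_test_cases; infer_instance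

-- ===== CLAIM (what is proved, stated in full; the proofs are below) =====
def Claim_equal_select_minimal_test_cases : Prop := ∀ (test_cases : List (List Int)), Dom_select_minimal_test_cases test_cases → Spec_select_minimal_test_cases test_cases (select_minimal_test_cases test_cases)

-- ===== LEMMAS AND PROOFS =====

-- B's dedup loop builds set(tc) in first-insertion order
lemma pvDedupB_eq (tc : List Int) : pvDedupB tc = PySem.Set.ofList tc := by
  have h : ∀ (d : List Int), tc.foldl (fun d r => if r ∈ d then d else d ++ [r]) d
      = tc.foldl PySem.Set.add d := by
    induction tc with
    | nil => intro d; rfl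
    | cons r t ih =>
      intro d
      simp only [List.foldl_cons, PySem.Set.add_eq_ite]
      exact ih _
  rw [pvDedupB, h, PySem.Set.ofList_eq_foldl]

-- membership in A's all_requirements accumulator
lemma pv_mem_allfold (tcs : List (List Int)) (s : PySem.Set Int) (r : Int) :
    r ∈ tcs.foldl (fun acc tc => PySem.Set.update acc tc) s ↔ r ∈ s ∨ ∃ tc ∈ tcs, r ∈ tc := by
  induction tcs generalizing s with
  | nil => simp
  | cons tc ts ih =>
    simp only [List.foldl_cons, ih, PySem.Set.mem_update, List.mem_cons]
    constructor
    · rintro (( h | h) | ⟨u, hu, hru⟩)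
      · exact Or.inl h
      · exact Or.inr ⟨tc, Or.inl rfl, h⟩
      · exact Or.inr ⟨u, Or.inr hu, hru⟩
    · rintro (h | ⟨u, (rfl | hu), hru⟩)
      · exact Or.inl (Or.inl h)
      · exact Or.inl (Or.inr hru)
      · exact Or.inr ⟨u, hu, hru⟩

-- which pairs enumerate produces
lemma pv_mem_enumerate {α : Type} (xs : List α) (s : Int) (p : Int × α) :
    p ∈ PySem.List.enumerate xs s ↔ ∃ i : Nat, ∃ h : i < xs.length, p = (s + (i : Int), xs[i]) := by
  induction xs generalizing s with
  | nil => simp [PySem.List.enumerate]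
  | cons x t ih =>
    rw [PySem.List.enumerate_cons]
    simp only [List.mem_cons, ih]
    constructor
    · rintro (rfl | ⟨i, h, rfl⟩)
      · exact ⟨0, by simp, by simp⟩
      · refine ⟨i + 1, by simpa using h, ?_⟩
        simp only [List.getElem_cons_succ]
        congr 1
        push_cast
        ring
    · rintro ⟨i, h, rfl⟩
      cases i with
      | zero => left; simp
      | succ i =>
        right
        refine ⟨i, by simpa using h, ?_⟩
        simp only [List.getElem_cons_succ]
        congr 1
        push_cast
        ring

-- B's max?-accumulator step, rephrased on enumerate pairs (it uses only the index)
def pvStepB (K : Int → Nat) (acc : Option Int) (p : Int × List Int) : Option Int :=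
  match acc with
  | none => some p.1
  | some m => if K m < K p.1 then some p.1 else some m

-- relation between A's (best_index, best_coverage) and B's running argmax
def pvRel (K : Int → Nat) (b : Int × Int) (acc : Option Int) : Prop :=
  match acc with
  | none => b = (-1, 0)
  | some m => b.2 = (K m : Int) ∧ (0 < b.2 → b.1 = m) ∧ (b.2 = 0 → b.1 = -1)

-- A's scan and B's max(range, key) pick the same test case
lemma pvBridge (selected : List Int) (covered : PySem.Set Int) (K : Int → Nat)
    (es : List (Int × List Int))
    (hK : ∀ p ∈ es, (PySem.Set.diff (PySem.Set.ofList p.2) covered).length = K p.1)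
    (hs : ∀ p ∈ es, p.1 ∈ selected → (PySem.Set.diff (PySem.Set.ofList p.2) covered).length = 0)
    (b : Int × Int) (acc : Option Int) (hrel : pvRel K b acc) :
    pvRel K (es.foldl (pvStepA selected covered) b) (es.foldl (pvStepB K) acc) := by
  induction es generalizing b acc with
  | nil => exact hrel
  | cons p es ih =>
    simp only [List.foldl_cons]
    apply ih
    · intro q hq; exact hK q (List.mem_cons_of_mem _ hq)
    · intro q hq; exact hs q (List.mem_cons_of_mem _ hq)
    -- head step preserves the relation
    have hKp : (PySem.Set.diff (PySem.Set.ofList p.2) covered).length = K p.1 :=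
      hK p (List.mem_cons_self ..)
    by_cases hpsel : p.1 ∈ selected
    · have hz : K p.1 = 0 := by rw [← hKp]; exact hs p (List.mem_cons_self ..) hpsel
      cases acc with
      | none =>
        simp only [pvRel] at hrel
        subst hrel
        simp only [pvStepA, pvStepB, if_pos hpsel]
        exact ⟨by simp [hz], by intro h; simp at h, fun _ => rfl⟩
      | some m =>
        obtain ⟨h1, h2, h3⟩ := hrel
        simp only [pvStepA, pvStepB, if_pos hpsel, hz]
        have hlt : ¬ K m < 0 := by omega
        rw [if_neg hlt]
        exact ⟨h1, h2, h3⟩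
    · cases acc with
      | none =>
        simp only [pvRel] at hrel
        subst hrel
        simp only [pvStepA, pvStepB, if_neg hpsel, hKp]
        by_cases hpos : ((K p.1 : Int)) > ((-1, 0) : Int × Int).2
        · rw [if_pos hpos]
          refine ⟨rfl, fun _ => rfl, by intro h; simp at h; omega⟩
        · rw [if_neg hpos]
          refine ⟨by simp; omega, by intro h; simp at h, fun _ => rfl⟩
      | some m =>
        obtain ⟨h1, h2, h3⟩ := hrel
        simp only [pvStepA, pvStepB, if_neg hpsel, hKp]
        by_cases hlt : K m < K p.1
        · have hgt : ((K p.1 : Int)) > b.2 := by rw [h1]; exact_mod_cast hlt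
          rw [if_pos hlt, if_pos hgt]
          refine ⟨rfl, fun _ => rfl, by intro h; simp at h; omega⟩
        · have hgt : ¬ ((K p.1 : Int)) > b.2 := by rw [h1]; simpa using hlt
          rw [if_neg hlt, if_neg hgt]
          exact ⟨h1, h2, h3⟩

-- A's scan result dominates every unskipped gain
lemma pvStepA_lb (selected : List Int) (covered : PySem.Set Int)
    (es : List (Int × List Int)) (b : Int × Int) :
    b.2 ≤ (es.foldl (pvStepA selected covered) b).2 ∧
    ∀ p ∈ es, p.1 ∉ selected →
      ((PySem.Set.diff (PySem.Set.ofList p.2) covered).length : Int) ≤ (es.foldl (pvStepA selected covered) b).2 := by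
  induction es generalizing b with
  | nil => exact ⟨le_refl _, by simp⟩
  | cons p es ih =>
    simp only [List.foldl_cons]
    obtain ⟨ih1, ih2⟩ := ih (pvStepA selected covered b p)
    have hstep : b.2 ≤ (pvStepA selected covered b p).2 := by
      simp only [pvStepA]
      by_cases hpsel : p.1 ∈ selected
      · rw [if_pos hpsel]
      · rw [if_neg hpsel]
        by_cases hgt : ((PySem.Set.diff (PySem.Set.ofList p.2) covered).length : Int) > b.2
        · rw [if_pos hgt]; exact le_of_lt hgt
        · rw [if_neg hgt]
    refine ⟨le_trans hstep ih1, ?_⟩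
    intro q hq hqsel
    rcases List.mem_cons.mp hq with rfl | hq'
    · refine le_trans ?_ ih1
      simp only [pvStepA, if_neg hqsel]
      by_cases hgt : ((PySem.Set.diff (PySem.Set.ofList q.2) covered).length : Int) > b.2
      · rw [if_pos hgt]
      · rw [if_neg hgt]; omega
    · exact ih2 q hq' hqsel

-- the loop invariant: A's (selected, covered) state matches B's residual lists
lemma pvLoop_eq (tcs : List (List Int)) (allReq : PySem.Set Int)
    (hall : ∀ r : Int, r ∈ allReq ↔ ∃ tc ∈ tcs, r ∈ tc) :
    ∀ (fuel : Nat) (selected : List Int) (covered : PySem.Set Int),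
    (∀ p ∈ PySem.List.enumerate tcs 0, p.1 ∈ selected → ∀ r ∈ p.2, r ∈ covered) →
    (∀ r ∈ covered, r ∈ allReq) →
    pvLoopA tcs allReq fuel selected covered
      = pvLoopB fuel (tcs.map (fun tc => (PySem.Set.ofList tc).filter (fun r => !(PySem.Set.contains covered r)))) selected := by
  intro fuel
  induction fuel with
  | zero => intro selected covered _ _; rfl
  | succ fuel ih =>
    intro selected covered hsel hcov
    by_cases heq : PySem.Set.equal covered allReq = true
    · -- both loops exit
      have hmemiff : ∀ x : Int, x ∈ covered ↔ x ∈ allReq := (PySem.Set.equal_iff _ _).mp heq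
      have hempty : ∀ tc ∈ tcs,
          (PySem.Set.ofList tc).filter (fun r => !(PySem.Set.contains covered r)) = [] := by
        intro tc htc
        apply List.filter_eq_nil_iff.mpr
        intro r hr
        have hrc : r ∈ covered :=
          (hmemiff r).mpr ((hall r).mpr ⟨tc, htc, (PySem.Set.mem_ofList tc r).mp hr⟩)
        simp [PySem.Set.contains, List.contains_eq_mem, hrc]
      have hany : (tcs.map (fun tc => (PySem.Set.ofList tc).filter (fun r => !(PySem.Set.contains covered r)))).any
          (fun l => !l.isEmpty) = false := by
        apply List.any_eq_false.mpr
        intro l hl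
        obtain ⟨tc, htc, rfl⟩ := List.mem_map.mp hl
        rw [hempty tc htc]
        simp
      have hany' : ¬ ((tcs.map (fun tc => (PySem.Set.ofList tc).filter (fun r => !(PySem.Set.contains covered r)))).any
          (fun l => !l.isEmpty) = true) := by rw [hany]; simp
      rw [pvLoopA, pvLoopB]
      rw [if_pos heq, if_neg hany']
    · -- a requirement is still uncovered: one more round on both sides
      have hex : ∃ r : Int, r ∈ allReq ∧ r ∉ covered := by
        by_contra hno
        push_neg at hno
        exact heq ((PySem.Set.equal_iff _ _).mpr
          (fun x => ⟨fun hx => hcov x hx, fun hx => hno x hx⟩))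
      obtain ⟨r0, hr0all, hr0cov⟩ := hex
      obtain ⟨tc0, htc0, hr0tc⟩ := (hall r0).mp hr0all
      obtain ⟨j0, hj0, htj0⟩ := List.mem_iff_getElem.mp htc0
      subst htj0
      set f : List Int → List Int :=
        fun tc => (PySem.Set.ofList tc).filter (fun r => !(PySem.Set.contains covered r)) with hf
      set rem : List (List Int) := tcs.map f with hrem
      have hlen : rem.length = tcs.length := by rw [hrem]; simp
      have hfj0 : r0 ∈ f tcs[j0] := by
        rw [hf]
        refine List.mem_filter.mpr ⟨(PySem.Set.mem_ofList _ _).mpr hr0tc, ?_⟩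
        simp [PySem.Set.contains, List.contains_eq_mem, hr0cov]
      have hanytrue : rem.any (fun l => !l.isEmpty) = true := by
        apply List.any_eq_true.mpr
        refine ⟨f tcs[j0], ?_, ?_⟩
        · rw [hrem]; exact List.mem_map_of_mem (List.getElem_mem hj0)
        · have hne : f tcs[j0] ≠ [] := by
            intro h; rw [h] at hfj0; exact List.not_mem_nil hfj0
          simp [List.isEmpty_iff, hne]
      set K : Int → Nat := fun i => (PySem.List.pyGetD rem i []).length with hK
      set es : List (Int × List Int) := PySem.List.enumerate tcs 0 with hes
      have hdiff_f : ∀ tc : List Int, PySem.Set.diff (PySem.Set.ofList tc) covered = f tc :=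
        fun _ => rfl
      have hKnat : ∀ (i : Nat) (h : i < tcs.length), K i = (f (tcs[i]'h)).length := by
        intro i h
        rw [hK]
        simp only [PySem.List.pyGetD_natCast]
        rw [List.getD_eq_getElem _ _ (by rw [hlen]; exact h)]
        congr 1
        simp [hrem]
      have hK_es : ∀ p ∈ es, (PySem.Set.diff (PySem.Set.ofList p.2) covered).length = K p.1 := by
        intro p hp
        rw [hes] at hp
        obtain ⟨i, hi, rfl⟩ := (pv_mem_enumerate tcs 0 p).mp hp
        simp only [zero_add]
        rw [hdiff_f, hKnat i hi]
      have hs_es : ∀ p ∈ es, p.1 ∈ selected →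
          (PySem.Set.diff (PySem.Set.ofList p.2) covered).length = 0 := by
        intro p hp hpsel
        have hcv := hsel p hp hpsel
        have hnil : PySem.Set.diff (PySem.Set.ofList p.2) covered = [] := by
          rw [hdiff_f, hf]
          apply List.filter_eq_nil_iff.mpr
          intro r hr
          have hrc : r ∈ covered := hcv r ((PySem.Set.mem_ofList _ _).mp hr)
          simp [PySem.Set.contains, List.contains_eq_mem, hrc]
        rw [hnil]; rfl
      have hrelfold := pvBridge selected covered K es hK_es hs_es (-1, 0) none rfl
      obtain ⟨hlb1, hlb2⟩ := pvStepA_lb selected covered es (-1, 0)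
      have hp0 : ((0 : Int) + (j0 : Int), tcs[j0]) ∈ es := by
        rw [hes]; exact (pv_mem_enumerate tcs 0 _).mpr ⟨j0, hj0, rfl⟩
      have hp0nsel : ((0 : Int) + (j0 : Int)) ∉ selected := by
        intro hin
        exact hr0cov (hsel _ hp0 hin r0 hr0tc)
      have hgain0 : 0 < (PySem.Set.diff (PySem.Set.ofList tcs[j0]) covered).length := by
        rw [hdiff_f]
        exact List.length_pos_of_mem hfj0
      have hpos : 0 < (es.foldl (pvStepA selected covered) (-1, 0)).2 := by
        have hx := hlb2 _ hp0 hp0nsel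
        simp only at hx
        omega
      have hBfold : PySem.List.max? (PySem.List.pyRange 0 (rem.length : Int) 1) K
          = es.foldl (pvStepB K) none := by
        have h1 : PySem.List.pyRange 0 (rem.length : Int) 1 = es.map (fun p => p.1) := by
          rw [hes, PySem.List.map_fst_enumerate]
          norm_num [hlen]
        rw [h1]
        unfold PySem.List.max?
        rw [List.foldl_map]
        congr 1
        funext acc p
        cases acc <;> rfl
      cases haccB : es.foldl (pvStepB K) none with
      | none =>
        rw [haccB] at hrelfold
        simp only [pvRel] at hrelfold
        rw [hrelfold] at hpos
        simp at hpos
      | some m =>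
      rw [haccB] at hrelfold
      obtain ⟨hb2, hb1, _⟩ := hrelfold
      have hbA1 : (es.foldl (pvStepA selected covered) (-1, 0)).1 = m := hb1 hpos
      have hMsome : PySem.List.max? (PySem.List.pyRange 0 (rem.length : Int) 1) K = some m := by
        rw [hBfold, haccB]
      have hmrange : (0 : Int) ≤ m ∧ m < (rem.length : Int) := by
        have := PySem.List.max?_mem hMsome
        exact PySem.List.mem_pyRange_one.mp this
      have hmnn : (0 : Int) ≤ m := hmrange.1
      set jm : Nat := m.toNat with hjm
      have hmcast : (jm : Int) = m := Int.toNat_of_nonneg hmnn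
      have hjmlt : jm < tcs.length := by
        have h2 := hmrange.2
        omega
      have hmltT : m < (tcs.length : Int) := by rw [← hlen]; exact hmrange.2
      have hpgA : PySem.List.pyGetD tcs m [] = tcs[jm] := by
        rw [← hmcast, PySem.List.pyGetD_natCast]
        exact List.getD_eq_getElem _ _ hjmlt
      have hjmltR : jm < rem.length := by rw [hlen]; exact hjmlt
      have hpgB : PySem.List.pyGetD rem m [] = f tcs[jm] := by
        rw [← hmcast, PySem.List.pyGetD_natCast]
        rw [List.getD_eq_getElem _ _ hjmltR]
        simp [hrem]
      -- one unfolded round on each side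
      have hA : pvLoopA tcs allReq (fuel + 1) selected covered
          = pvLoopA tcs allReq fuel (selected ++ [m]) (PySem.Set.update covered tcs[jm]) := by
        rw [pvLoopA, if_neg heq]
        show (if (pvBestA tcs selected covered).1 ≠ -1 then
            pvLoopA tcs allReq fuel (selected ++ [(pvBestA tcs selected covered).1])
              (PySem.Set.update covered (PySem.List.pyGetD tcs (pvBestA tcs selected covered).1 []))
          else selected) = _
        have hbv : (pvBestA tcs selected covered).1 = m := by
          rw [pvBestA, ← hes]
          exact hbA1
        rw [hbv, if_pos (by omega : m ≠ -1), hpgA]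
      have hB : pvLoopB (fuel + 1) rem selected
          = pvLoopB fuel
              (rem.map (fun l => l.filter (fun r =>
                !(PySem.Set.contains (PySem.Set.ofList (f tcs[jm])) r))))
              (selected ++ [m]) := by
        rw [pvLoopB, if_pos hanytrue]
        show pvLoopB fuel
            (rem.map (fun l => l.filter (fun r =>
              !(PySem.Set.contains (PySem.Set.ofList (PySem.List.pyGetD rem
                ((PySem.List.max? (PySem.List.pyRange 0 (rem.length : Int) 1) K).getD 0) [])) r))))
            (selected ++ [(PySem.List.max? (PySem.List.pyRange 0 (rem.length : Int) 1) K).getD 0])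
          = _
        rw [hMsome]
        simp only [Option.getD_some]
        rw [hpgB]
      have hsel' : ∀ p ∈ es, p.1 ∈ selected ++ [m] → ∀ r ∈ p.2,
          r ∈ PySem.Set.update covered tcs[jm] := by
        intro p hp hpin r hr
        rcases List.mem_append.mp hpin with h | h
        · exact (PySem.Set.mem_update _ _ _).mpr (Or.inl (hsel p hp h r hr))
        · have hpm : p.1 = m := by simpa using h
          rw [hes] at hp
          obtain ⟨i, hi, rfl⟩ := (pv_mem_enumerate tcs 0 p).mp hp
          have hijm : i = jm := by
            simp only [zero_add] at hpm
            omega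
          subst hijm
          exact (PySem.Set.mem_update _ _ _).mpr (Or.inr hr)
      have hcov' : ∀ r ∈ PySem.Set.update covered tcs[jm], r ∈ allReq := by
        intro r hrm
        rcases (PySem.Set.mem_update _ _ _).mp hrm with h | h
        · exact hcov r h
        · exact (hall r).mpr ⟨tcs[jm], List.getElem_mem hjmlt, h⟩
      have hrem' : rem.map (fun l => l.filter (fun r =>
            !(PySem.Set.contains (PySem.Set.ofList (f tcs[jm])) r)))
          = tcs.map (fun tc => (PySem.Set.ofList tc).filter (fun r =>
              !(PySem.Set.contains (PySem.Set.update covered tcs[jm]) r))) := by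
        rw [hrem, List.map_map]
        apply List.map_congr_left
        intro tc _
        show (f tc).filter _ = _
        conv_lhs => rw [hf]
        rw [List.filter_filter]
        apply List.filter_congr
        intro a _
        simp only [PySem.Set.contains, List.contains_eq_mem]
        by_cases h1 : a ∈ covered <;> by_cases h2 : a ∈ tcs[jm] <;>
          simp [h1, h2, PySem.Set.mem_update, PySem.Set.mem_ofList, List.mem_filter, hf,
            PySem.Set.contains, List.contains_eq_mem]
      rw [hA, ih (selected ++ [m]) (PySem.Set.update covered tcs[jm]) hsel' hcov', hB, hrem']

-- ===== VERDICT (by name: the statement is the Claim_ definition above) =====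
theorem select_minimal_test_cases_spec : Claim_equal_select_minimal_test_cases := by
  unfold Claim_equal_select_minimal_test_cases
  intro tcs _
  unfold Spec_select_minimal_test_cases
  show select_minimal_test_cases tcs = select_minimal_test_cases_alt tcs
  unfold select_minimal_test_cases select_minimal_test_cases_alt
  have hrem0 : tcs.foldl (fun rem tc => rem ++ [pvDedupB tc]) []
      = tcs.map (fun tc => (PySem.Set.ofList tc).filter (fun r =>
          !(PySem.Set.contains (PySem.Set.empty : PySem.Set Int) r))) := by
    rw [PySem.List.foldl_append_singleton_eq_map]
    simp only [List.nil_append]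
    apply List.map_congr_left
    intro tc _
    rw [pvDedupB_eq]
    refine (List.filter_eq_self.mpr ?_).symm
    intro a _
    simp [PySem.Set.contains, PySem.Set.empty]
  show pvLoopA tcs (tcs.foldl (fun acc tc => PySem.Set.update acc tc) PySem.Set.empty)
      (tcs.length + 1) [] PySem.Set.empty
    = pvLoopB (tcs.length + 1) (tcs.foldl (fun rem tc => rem ++ [pvDedupB tc]) []) []
  rw [hrem0]
  exact pvLoop_eq tcs _
    (fun r => by rw [pv_mem_allfold]; simp [PySem.Set.empty])
    (tcs.length + 1) [] PySem.Set.empty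
    (by simp) (by simp [PySem.Set.empty])
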